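-- pv_equiv track=rewrite | github.com/dominic-triolo/social_analyzer_mvp_2 | app/routes/monitor.py | _build_stages
-- ===== SOURCE A (Python) =====
-- STAGE_ORDER = ['discovery', 'pre_screen', 'enrichment', 'analysis', 'scoring', 'crm_sync']
--
-- def _build_stages(run_dict):
--     """Compute stage statuses for a run dict."""
--     current_stage = run_dict.get('current_stage', '')
--     run_status = run_dict.get('status', '')
--     current_idx = STAGE_ORDER.index(current_stage) if current_stage in STAGE_ORDER else -1
--
--     stages = []
--     for i, key in enumerate(STAGE_ORDER):
--         if run_status == 'failed' and i == current_idx: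
--             s = 'failed'
--         elif run_status == 'completed':
--             s = 'completed'
--         elif i < current_idx:
--             s = 'completed'
--         elif i == current_idx:
--             s = 'running'
--         else:
--             s = 'pending'
--         stages.append({'key': key, 'status': s})
--     return stages
-- ===== SOURCE B (Python) =====
-- STAGE_ORDER = ['discovery', 'pre_screen', 'enrichment', 'analysis', 'scoring', 'crm_sync']
--
-- def _build_stages(run_dict):
--     """Compute stage statuses for a run dict, index-free: a recursive scan that
--     emits 'completed' until it meets the current stage, then the middle status
--     and 'pending' for everything after; no stage index is ever computed."""
--     run_status = run_dict.get('status', '')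
--     current = run_dict.get('current_stage', '')
--     if run_status == 'completed':
--         return [{'key': k, 'status': 'completed'} for k in STAGE_ORDER]
--     if current not in STAGE_ORDER:
--         return [{'key': k, 'status': 'pending'} for k in STAGE_ORDER]
--     mid = 'failed' if run_status == 'failed' else 'running'
--
--     def walk(keys):
--         if not keys:
--             return []
--         head, rest = keys[0], keys[1:]
--         if head == current:
--             return ([{'key': head, 'status': mid}]
--                     + [{'key': r, 'status': 'pending'} for r in rest])
--         return [{'key': head, 'status': 'completed'}] + walk(rest)
--
--     return walk(STAGE_ORDER)
-- ===== Notes on version B (the rewrite author's own statement) =====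
-- stated objective: alternative
-- what changed: Replaces A's index computation (STAGE_ORDER.index) plus per-stage 5-way i-vs-index comparison with an index-free recursive scan: after two whole-list shortcuts, a recursion over STAGE_ORDER emits 'completed' until it reaches the current stage by key equality, then the failed/running element and 'pending' for the remaining suffix.
import Mathlib
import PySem

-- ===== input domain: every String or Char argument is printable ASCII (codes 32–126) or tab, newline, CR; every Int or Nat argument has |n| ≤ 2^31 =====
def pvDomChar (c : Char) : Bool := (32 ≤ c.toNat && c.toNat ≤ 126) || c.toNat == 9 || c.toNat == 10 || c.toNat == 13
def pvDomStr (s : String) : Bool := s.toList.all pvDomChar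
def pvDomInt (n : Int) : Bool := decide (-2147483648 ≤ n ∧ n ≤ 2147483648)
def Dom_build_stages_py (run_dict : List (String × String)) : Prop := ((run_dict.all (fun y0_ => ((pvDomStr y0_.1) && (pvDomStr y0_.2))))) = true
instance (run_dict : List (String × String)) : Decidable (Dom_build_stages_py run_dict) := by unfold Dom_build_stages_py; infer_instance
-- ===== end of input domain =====

-- B replaces the index-based classification with an index-free recursive scan (alternative decomposition, not faster); equivalence of the RETURN value is what is proved.

-- shared module constant STAGE_ORDER
def pvStageOrder : List String := ["discovery", "pre_screen", "enrichment", "analysis", "scoring", "crm_sync"]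

-- run_dict.get(k, dflt) on an association list: first match, else default
def pvDictGet (d : List (String × String)) (k dflt : String) : String :=
  ((d.find? (fun p => p.1 == k)).map Prod.snd).getD dflt

-- ===== PORT A =====
def build_stages_py (run_dict : List (String × String)) : List (List (String × String)) :=
  let current_stage := pvDictGet run_dict "current_stage" ""
  let run_status := pvDictGet run_dict "status" ""
  let current_idx : Int :=
    if current_stage ∈ pvStageOrder then
      (((PySem.List.index? pvStageOrder current_stage).getD 0 : Nat) : Int)
    else -1
  (PySem.List.enumerate pvStageOrder).foldl (fun stages p =>
    let i := p.1
    let key := p.2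
    let s :=
      if run_status == "failed" && i == current_idx then "failed"
      else if run_status == "completed" then "completed"
      else if i < current_idx then "completed"
      else if i == current_idx then "running"
      else "pending"
    stages ++ [[("key", key), ("status", s)]]) []

-- ===== PORT B =====
-- B's inner 'walk': emit 'completed' until the current stage is met by key equality,
-- then the middle status and 'pending' for the rest (no index computed anywhere).
def pvWalk (current mid : String) : List String → List (List (String × String))
  | [] => []
  | head :: rest =>
      if head == current then
        [("key", head), ("status", mid)] :: rest.map (fun r => [("key", r), ("status", "pending")])
      else
        [("key", head), ("status", "completed")] :: pvWalk current mid rest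

def build_stages_py_alt (run_dict : List (String × String)) : List (List (String × String)) :=
  let run_status := pvDictGet run_dict "status" ""
  let current := pvDictGet run_dict "current_stage" ""
  if run_status == "completed" then
    pvStageOrder.map (fun k => [("key", k), ("status", "completed")])
  else if current ∉ pvStageOrder then
    pvStageOrder.map (fun k => [("key", k), ("status", "pending")])
  else
    pvWalk current (if run_status == "failed" then "failed" else "running") pvStageOrder

-- ===== PRECONDITION & SPEC =====
def Spec_build_stages_py (run_dict : List (String × String)) (out : List (List (String × String))) : Prop := out = build_stages_py_alt run_dict
instance (run_dict : List (String × String)) (out : List (List (String × String))) : Decidable (Spec_build_stages_py run_dict out) := by unfold Spec_build_stages_py; infer_instance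

-- ===== CLAIM (what is proved, stated in full; the proofs are below) =====
def Claim_equal_build_stages_py : Prop := ∀ (run_dict : List (String × String)), Dom_build_stages_py run_dict → Spec_build_stages_py run_dict (build_stages_py run_dict)

-- ===== LEMMAS AND PROOFS =====

-- Both ports depend on run_dict only through the two looked-up strings; the core equality for arbitrary strings:
lemma pv_core (cs rs : String) :
    ((let current_idx : Int :=
        if cs ∈ pvStageOrder then
          (((PySem.List.index? pvStageOrder cs).getD 0 : Nat) : Int)
        else -1
      (PySem.List.enumerate pvStageOrder).foldl (fun stages p =>
        let s :=
          if rs == "failed" && p.1 == current_idx then "failed"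
          else if rs == "completed" then "completed"
          else if p.1 < current_idx then "completed"
          else if p.1 == current_idx then "running"
          else "pending"
        stages ++ [[("key", p.2), ("status", s)]]) []) : List (List (String × String)))
    =
    (if rs == "completed" then
      pvStageOrder.map (fun k => [("key", k), ("status", "completed")])
    else if cs ∉ pvStageOrder then
      pvStageOrder.map (fun k => [("key", k), ("status", "pending")])
    else
      pvWalk cs (if rs == "failed" then "failed" else "running") pvStageOrder) := by
  by_cases hm : cs ∈ pvStageOrder
  · simp only [pvStageOrder, List.mem_cons, List.not_mem_nil, or_false] at hm
    by_cases hf : rs = "failed"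
    · rcases hm with h | h | h | h | h | h <;> subst h <;> subst hf <;> decide
    · by_cases hc : rs = "completed"
      · rcases hm with h | h | h | h | h | h <;> subst h <;> subst hc <;> decide
      · rcases hm with h | h | h | h | h | h <;> subst h <;>
          simp [pvStageOrder, pvWalk, PySem.List.enumerate, PySem.List.index?, List.idxOf?,
            List.findIdx?, List.findIdx?.go, hf, hc]
  · simp only [pvStageOrder, List.mem_cons, List.not_mem_nil, or_false, not_or] at hm
    obtain ⟨h1, h2, h3, h4, h5, h6⟩ := hm
    by_cases hc : rs = "completed"
    · subst hc
      simp [pvStageOrder, PySem.List.enumerate, h1, h2, h3, h4, h5, h6]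
    · simp [pvStageOrder, PySem.List.enumerate, hc, h1, h2, h3, h4, h5, h6,
        Ne.symm h1, Ne.symm h2, Ne.symm h3, Ne.symm h4]

-- ===== VERDICT (by name: the statement is the Claim_ definition above) =====
theorem build_stages_py_spec : Claim_equal_build_stages_py := by
  intro run_dict _
  unfold Spec_build_stages_py build_stages_py build_stages_py_alt
  exact pv_core (pvDictGet run_dict "current_stage" "") (pvDictGet run_dict "status" "")
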